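-- pv_equiv track=rewrite | github.com/sys-bio/ratesb-python | ratesb_python/common/analyzer.py | _identify_parameters_in_kinetics
-- ===== SOURCE A (Python) =====
-- def _identify_parameters_in_kinetics(ids_list, species_list, parameter_list, compartment_list):
--     species_in_kinetic_law = []
--     parameters_in_kinetic_law_only = []
--     compartment_in_kinetic_law = []
--     others_in_kinetic_law = []
--
--     for id in ids_list:
--         if id in species_list:
--             species_in_kinetic_law.append(id)
--         elif id in parameter_list:
--             parameters_in_kinetic_law_only.append(id)
--         elif id in compartment_list:
--             compartment_in_kinetic_law.append(id)
--             others_in_kinetic_law.append(id)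
--         else:
--             others_in_kinetic_law.append(id)
--
--     return species_in_kinetic_law, parameters_in_kinetic_law_only, compartment_in_kinetic_law, others_in_kinetic_law
-- ===== SOURCE B (Python) =====
-- def _identify_parameters_in_kinetics(ids_list, species_list, parameter_list, compartment_list):
--     species = [id for id in ids_list if id in species_list]
--     parameters = [id for id in ids_list
--                   if id not in species_list and id in parameter_list]
--     compartments = [id for id in ids_list
--                     if id not in species_list and id not in parameter_list
--                     and id in compartment_list]
--     others = [id for id in ids_list
--               if id not in species_list and id not in parameter_list]
--     return species, parameters, compartments, others
-- ===== Notes on version B (the rewrite author's own statement) =====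
-- stated objective: simpler
-- what changed: Replaces the single priority loop maintaining four accumulators with four independent filtering comprehensions over ids_list, one per output (the others filter deliberately ignores compartment membership, matching A's behaviour of putting compartments in others too).
import Mathlib
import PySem

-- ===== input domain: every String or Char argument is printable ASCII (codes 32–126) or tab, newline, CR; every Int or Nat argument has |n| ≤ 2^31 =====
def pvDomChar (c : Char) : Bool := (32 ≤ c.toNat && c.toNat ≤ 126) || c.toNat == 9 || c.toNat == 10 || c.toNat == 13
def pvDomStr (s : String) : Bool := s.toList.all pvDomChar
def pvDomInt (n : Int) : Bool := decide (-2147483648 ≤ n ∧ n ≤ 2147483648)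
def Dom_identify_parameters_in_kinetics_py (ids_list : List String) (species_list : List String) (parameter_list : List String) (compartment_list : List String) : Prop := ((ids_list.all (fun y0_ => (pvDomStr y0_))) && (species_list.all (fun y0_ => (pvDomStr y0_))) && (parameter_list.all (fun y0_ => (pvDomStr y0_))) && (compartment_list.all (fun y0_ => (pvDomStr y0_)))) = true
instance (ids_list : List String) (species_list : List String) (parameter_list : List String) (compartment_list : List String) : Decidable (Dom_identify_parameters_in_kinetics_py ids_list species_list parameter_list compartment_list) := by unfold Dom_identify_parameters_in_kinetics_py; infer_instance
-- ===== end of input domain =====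

-- B replaces A's single priority loop with four independent filter passes (one per output); same results, objective: simpler.


-- ===== PORT A =====
-- One priority loop over ids_list, appending each id to one (or two) of four accumulators,
-- transliterated as a foldl over the same four-list state.
def identify_parameters_in_kinetics_py (ids_list : List String) (species_list : List String) (parameter_list : List String) (compartment_list : List String) : List String × List String × List String × List String :=
  ids_list.foldl
    (fun st id =>
      let (s, p, c, o) := st
      if species_list.contains id then (s ++ [id], p, c, o)
      else if parameter_list.contains id then (s, p ++ [id], c, o)
      else if compartment_list.contains id then (s, p, c ++ [id], o ++ [id])
      else (s, p, c, o ++ [id]))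
    ([], [], [], [])

-- ===== PORT B =====
-- B: four independent filtering passes, one per output.
def identify_parameters_in_kinetics_py_alt (ids_list : List String) (species_list : List String) (parameter_list : List String) (compartment_list : List String) : List String × List String × List String × List String :=
  (ids_list.filter (fun id => species_list.contains id),
   ids_list.filter (fun id => !species_list.contains id && parameter_list.contains id),
   ids_list.filter (fun id => !species_list.contains id && !parameter_list.contains id && compartment_list.contains id),
   ids_list.filter (fun id => !species_list.contains id && !parameter_list.contains id))

-- ===== PRECONDITION & SPEC =====
def Spec_identify_parameters_in_kinetics_py (ids_list : List String) (species_list : List String) (parameter_list : List String) (compartment_list : List String) (out : List String × List String × List String × List String) : Prop := out = identify_parameters_in_kinetics_py_alt ids_list species_list parameter_list compartment_list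
instance (ids_list : List String) (species_list : List String) (parameter_list : List String) (compartment_list : List String) (out : List String × List String × List String × List String) : Decidable (Spec_identify_parameters_in_kinetics_py ids_list species_list parameter_list compartment_list out) := by unfold Spec_identify_parameters_in_kinetics_py; infer_instance

-- ===== CLAIM (what is proved, stated in full; the proofs are below) =====
def Claim_equal_identify_parameters_in_kinetics_py : Prop := ∀ (ids_list : List String) (species_list : List String) (parameter_list : List String) (compartment_list : List String), Dom_identify_parameters_in_kinetics_py ids_list species_list parameter_list compartment_list → Spec_identify_parameters_in_kinetics_py ids_list species_list parameter_list compartment_list (identify_parameters_in_kinetics_py ids_list species_list parameter_list compartment_list)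

-- ===== LEMMAS AND PROOFS =====

-- Loop invariant: the fold from state (s,p,c,o) appends the four filters of the remaining ids.
theorem ipk_foldl_eq (ids sp pa co : List String) (s p c o : List String) :
    ids.foldl
      (fun st id =>
        let (s, p, c, o) := st
        if sp.contains id then (s ++ [id], p, c, o)
        else if pa.contains id then (s, p ++ [id], c, o)
        else if co.contains id then (s, p, c ++ [id], o ++ [id])
        else (s, p, c, o ++ [id]))
      (s, p, c, o)
    = (s ++ ids.filter (fun id => sp.contains id),
       p ++ ids.filter (fun id => !sp.contains id && pa.contains id),
       c ++ ids.filter (fun id => !sp.contains id && !pa.contains id && co.contains id),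
       o ++ ids.filter (fun id => !sp.contains id && !pa.contains id)) := by
  induction ids generalizing s p c o with
  | nil => simp
  | cons hd tl ih =>
    simp only [List.foldl_cons]
    by_cases h1 : hd ∈ sp
    · rw [if_pos (by simpa using h1), ih]; simp [List.filter_cons, h1]
    · rw [if_neg (by simpa using h1)]
      by_cases h2 : hd ∈ pa
      · rw [if_pos (by simpa using h2), ih]; simp [List.filter_cons, h1, h2]
      · rw [if_neg (by simpa using h2)]
        by_cases h3 : hd ∈ co
        · rw [if_pos (by simpa using h3), ih]; simp [List.filter_cons, h1, h2, h3]
        · rw [if_neg (by simpa using h3), ih]; simp [List.filter_cons, h1, h2, h3]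

-- ===== VERDICT (by name: the statement is the Claim_ definition above) =====
theorem identify_parameters_in_kinetics_py_spec : Claim_equal_identify_parameters_in_kinetics_py := by
  intro ids sp pa co _
  unfold Spec_identify_parameters_in_kinetics_py identify_parameters_in_kinetics_py identify_parameters_in_kinetics_py_alt
  rw [ipk_foldl_eq]
  simp
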